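-- pv_equiv track=rewrite | github.com/manwar/perlweeklychallenge-club | challenge-245/pokgopun/python/ch-1.py | sortL
-- ===== SOURCE A (Python) =====
-- def sortL(tup1,tup2: tuple):
--     return tuple(
--             tup[0] for tup in
--             sorted(
--                 map(lambda e1,e2: (e1,e2), tup1, tup2),
--                 key=lambda tup: tup[1]
--                 )
--             )
-- ===== SOURCE B (Python) =====
-- def sortL(tup1, tup2: tuple):
--     # Selection sort by repeated extraction of the first pair with minimal
--     # tup2-key (strict '<' keeps the first minimum, so tie order is stable).
--     pairs = list(zip(tup1, tup2))
--     out = []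
--     while pairs:
--         j, m = 0, pairs[0]
--         for i, p in enumerate(pairs):
--             if p[1] < m[1]:
--                 j, m = i, p
--         pairs.pop(j)
--         out.append(m[0])
--     return tuple(out)
-- ===== Notes on version B (the rewrite author's own statement) =====
-- stated objective: alternative
-- what changed: B never calls a sort: it repeatedly scans the remaining zipped pairs for the first pair with minimal tup2-key, emits its tup1 component and removes it (selection by repeated minimum extraction), instead of building the pair list and handing it to the built-in stable sort; it trades O(n log n) for O(n^2).
import Mathlib
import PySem

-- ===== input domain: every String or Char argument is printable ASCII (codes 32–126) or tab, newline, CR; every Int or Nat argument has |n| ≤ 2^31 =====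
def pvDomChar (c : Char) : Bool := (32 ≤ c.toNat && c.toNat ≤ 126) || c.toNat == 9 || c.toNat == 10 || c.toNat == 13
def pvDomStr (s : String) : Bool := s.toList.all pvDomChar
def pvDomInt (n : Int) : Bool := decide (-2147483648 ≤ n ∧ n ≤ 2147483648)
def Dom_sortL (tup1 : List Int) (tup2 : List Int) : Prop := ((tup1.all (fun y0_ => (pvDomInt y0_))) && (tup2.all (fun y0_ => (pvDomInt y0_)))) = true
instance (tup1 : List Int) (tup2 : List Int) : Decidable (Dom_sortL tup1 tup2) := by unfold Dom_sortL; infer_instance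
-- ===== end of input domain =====

-- B replaces the built-in stable sort of zipped pairs by selection: repeated
-- linear scans extracting the first pair with minimal tup2-key (objective:
-- alternative algorithm; B is O(n^2), not faster).

-- ===== PORT A =====
-- map(lambda e1,e2:(e1,e2), tup1, tup2) truncates to the shorter input = List.zip;
-- sorted(..., key=lambda tup: tup[1]) is the stable PySem sort; the generator takes tup[0].
def sortL (tup1 : List Int) (tup2 : List Int) : List Int :=
  (PySem.List.sorted (tup1.zip tup2) (fun tup => tup.2) false).map (fun tup => tup.1)

-- ===== PORT B =====
-- the inner 'for i, p in enumerate(pairs): if p[1] < m[1]: j, m = i, p' loop: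
-- state (i, j, m) = (current index, best index so far, best pair so far).
def argminGo : List (Int × Int) → Nat → Nat → (Int × Int) → Nat × (Int × Int)
  | [], _, j, m => (j, m)
  | p :: rest, i, j, m =>
      if p.2 < m.2 then argminGo rest (i + 1) i p else argminGo rest (i + 1) j m

-- the 'while pairs:' loop; fuel = initial length makes the recursion structural
-- (each pass pops exactly one element, so the fuel is never exhausted early).
def selGo : Nat → List (Int × Int) → List Int
  | _, [] => []
  | 0, _ :: _ => []
  | n + 1, p :: rest =>
      let jm := argminGo (p :: rest) 0 0 p
      -- pairs.pop(j): j is in range, the popped pair is m; eraseIdx is the rest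
      jm.2.1 :: selGo n ((p :: rest).eraseIdx jm.1)

def sortL_alt (tup1 : List Int) (tup2 : List Int) : List Int :=
  let pairs := tup1.zip tup2
  selGo pairs.length pairs

-- ===== PRECONDITION & SPEC =====
def Spec_sortL (tup1 : List Int) (tup2 : List Int) (out : List Int) : Prop := out = sortL_alt tup1 tup2
instance (tup1 : List Int) (tup2 : List Int) (out : List Int) : Decidable (Spec_sortL tup1 tup2 out) := by unfold Spec_sortL; infer_instance

-- ===== CLAIM (what is proved, stated in full; the proofs are below) =====
def Claim_equal_sortL : Prop := ∀ (tup1 : List Int) (tup2 : List Int), Dom_sortL tup1 tup2 → Spec_sortL tup1 tup2 (sortL tup1 tup2)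

-- ===== LEMMAS AND PROOFS =====

-- insertBy puts m at the head when its key is strictly below every key in s.
theorem insertBy_head (m : Int × Int) (s : List (Int × Int))
    (h : ∀ y ∈ s, m.2 < y.2) :
    PySem.List.insertBy (fun a b => decide (a.2 < b.2)) m s = m :: s := by
  cases s with
  | nil => rfl
  | cons y ys => simp [PySem.List.insertBy, h y (by simp)]

-- folding insertions over l2 never moves a head whose key is ≤ every key in l2.
theorem foldl_insert_cons (m : Int × Int) (l2 s : List (Int × Int))
    (h : ∀ b ∈ l2, m.2 ≤ b.2) :
    List.foldl (fun acc x => PySem.List.insertBy (fun a b => decide (a.2 < b.2)) x acc) (m :: s) l2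
      = m :: List.foldl (fun acc x => PySem.List.insertBy (fun a b => decide (a.2 < b.2)) x acc) s l2 := by
  induction l2 generalizing s with
  | nil => rfl
  | cons b l2 ih =>
    have hb : ¬ (b.2 < m.2) := not_lt.mpr (h b (by simp))
    simp only [List.foldl, PySem.List.insertBy, decide_eq_true_eq, if_neg hb]
    exact ih _ (fun x hx => h x (by simp [hx]))

-- the stable sort extracts a first minimum: strict smaller than everything
-- before it, ≤ everything after it.
theorem sorted_extract (l1 l2 : List (Int × Int)) (m : Int × Int)
    (h1 : ∀ a ∈ l1, m.2 < a.2) (h2 : ∀ b ∈ l2, m.2 ≤ b.2) :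
    PySem.List.sorted (l1 ++ m :: l2) (fun tup => tup.2) false
      = m :: PySem.List.sorted (l1 ++ l2) (fun tup => tup.2) false := by
  rw [PySem.List.sorted_eq_foldl_insertBy, PySem.List.sorted_eq_foldl_insertBy]
  rw [show l1 ++ m :: l2 = (l1 ++ [m]) ++ l2 by simp, List.foldl_append, List.foldl_append,
      List.foldl_append]
  simp only [List.foldl]
  rw [insertBy_head m _ (by
    intro y hy
    have : y ∈ PySem.List.sorted l1 (fun tup => tup.2) false := by
      rw [PySem.List.sorted_eq_foldl_insertBy]; exact hy
    exact h1 y ((PySem.List.mem_sorted _ _ _ _).mp this))]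
  exact foldl_insert_cons m l2 _ h2

-- invariant of the argmin scan: the processed prefix splits as l1 ++ m :: l2
-- with j = |l1|, keys of l1 strictly above m, keys of l2 at least m; the scan
-- extends this decomposition over the remaining list.
theorem argminGo_spec (rest : List (Int × Int)) :
    ∀ (l1 l2 : List (Int × Int)) (m : Int × Int),
      (∀ a ∈ l1, m.2 < a.2) → (∀ b ∈ l2, m.2 ≤ b.2) →
      ∃ l1' l2' m',
        argminGo rest (l1 ++ m :: l2).length l1.length m = (l1'.length, m') ∧
        (l1 ++ m :: l2) ++ rest = l1' ++ m' :: l2' ∧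
        (∀ a ∈ l1', m'.2 < a.2) ∧ (∀ b ∈ l2', m'.2 ≤ b.2) := by
  induction rest with
  | nil =>
    intro l1 l2 m h1 h2
    exact ⟨l1, l2, m, rfl, by simp, h1, h2⟩
  | cons p rest ih =>
    intro l1 l2 m h1 h2
    simp only [argminGo]
    by_cases hp : p.2 < m.2
    · have h1' : ∀ a ∈ l1 ++ m :: l2, p.2 < a.2 := by
        intro a ha
        rcases List.mem_append.mp ha with ha | ha
        · exact lt_trans hp (h1 a ha)
        · rcases List.mem_cons.mp ha with rfl | ha
          · exact hp
          · exact lt_of_lt_of_le hp (h2 a ha)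
      obtain ⟨l1', l2', m', heq, hsplit, g1, g2⟩ :=
        ih (l1 ++ m :: l2) [] p h1' (by simp)
      refine ⟨l1', l2', m', ?_, ?_, g1, g2⟩
      · rw [if_pos hp]
        have : ((l1 ++ m :: l2) ++ p :: ([] : List (Int × Int))).length
            = (l1 ++ m :: l2).length + 1 := by
          simp only [List.length_append, List.length_cons, List.length_nil]; try omega
        rw [← this]; exact heq
      · simpa using hsplit
    · have h2' : ∀ b ∈ l2 ++ [p], m.2 ≤ b.2 := by
        intro b hb
        rcases List.mem_append.mp hb with hb | hb
        · exact h2 b hb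
        · simp at hb; subst hb; exact not_lt.mp hp
      obtain ⟨l1', l2', m', heq, hsplit, g1, g2⟩ := ih l1 (l2 ++ [p]) m h1 h2'
      refine ⟨l1', l2', m', ?_, ?_, g1, g2⟩
      · rw [if_neg hp]
        have : (l1 ++ m :: (l2 ++ [p])).length = (l1 ++ m :: l2).length + 1 := by
          simp only [List.length_append, List.length_cons, List.length_nil]; try omega
        rw [← this]; exact heq
      · have : (l1 ++ m :: (l2 ++ [p])) ++ rest = (l1 ++ m :: l2) ++ p :: rest := by simp
        rw [← this]; exact hsplit

theorem eraseIdx_append_cons (l1 l2 : List (Int × Int)) (m : Int × Int) :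
    (l1 ++ m :: l2).eraseIdx l1.length = l1 ++ l2 := by
  induction l1 with
  | nil => rfl
  | cons a l1 ih => simp [ih]

-- the selection loop computes the stable sort's first components.
theorem selGo_eq_sorted (n : Nat) :
    ∀ ps : List (Int × Int), ps.length ≤ n →
      selGo n ps = (PySem.List.sorted ps (fun tup => tup.2) false).map (fun tup => tup.1) := by
  induction n with
  | zero =>
    intro ps hps
    rw [List.length_eq_zero_iff.mp (Nat.le_zero.mp hps)]
    rfl
  | succ n ih =>
    intro ps hps
    match ps with
    | [] => rfl
    | p :: rest =>
      simp only [selGo]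
      -- the first loop step keeps (j, m) = (0, p) since ¬ p.2 < p.2
      have hstep : argminGo (p :: rest) 0 0 p = argminGo rest 1 0 p := by
        simp [argminGo]
      obtain ⟨l1, l2, m, heq, hsplit, h1, h2⟩ :=
        argminGo_spec rest ([] : List (Int × Int)) [] p (by simp) (by simp)
      simp only [List.nil_append, List.length_nil] at heq hsplit
      have hargmin : argminGo (p :: rest) 0 0 p = (l1.length, m) := by
        rw [hstep]
        simpa using heq
      rw [hargmin]
      rw [show p :: rest = ([p] ++ rest) by rfl, hsplit, eraseIdx_append_cons,
          sorted_extract l1 l2 m h1 h2]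
      have hlen : (l1 ++ l2).length ≤ n := by
        have : ([p] ++ rest).length = (l1 ++ m :: l2).length := by rw [hsplit]
        simp only [List.length_append, List.length_cons, List.length_nil] at this hps ⊢
        omega
      rw [ih (l1 ++ l2) hlen]
      rfl

-- ===== VERDICT (by name: the statement is the Claim_ definition above) =====
theorem sortL_spec : Claim_equal_sortL := by
  intro tup1 tup2 _
  unfold Spec_sortL sortL sortL_alt
  exact (selGo_eq_sorted (tup1.zip tup2).length (tup1.zip tup2) le_rfl).symm
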